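-- pv_equiv track=rewrite | github.com/Matteo-Candi/Master-Thesis | benchmark/Python_formatted.py | ways_to_k_adjacent_set_bits
-- ===== SOURCE A (Python) =====
-- def ways_to_k_adjacent_set_bits(n, k, current_index, adjacent_set_bits, last_bit):
--     if current_index == n:
--         if adjacent_set_bits == k:
--             return 1
--         return 0
--     no_of_ways = 0
--     if last_bit == 1:
--         no_of_ways += ways_to_k_adjacent_set_bits(n, k, current_index + 1, adjacent_set_bits + 1, 1)
--         no_of_ways += ways_to_k_adjacent_set_bits(n, k, current_index + 1, adjacent_set_bits, 0)
--     elif last_bit != 1: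
--         no_of_ways += ways_to_k_adjacent_set_bits(n, k, current_index + 1, adjacent_set_bits, 1)
--         no_of_ways += ways_to_k_adjacent_set_bits(n, k, current_index + 1, adjacent_set_bits, 0)
--     return no_of_ways
-- ===== SOURCE B (Python) =====
-- def ways_to_k_adjacent_set_bits(n, k, current_index, adjacent_set_bits, last_bit):
--     m = n - current_index
--     t = k - adjacent_set_bits
--     if t < 0 or t > m:
--         return 0
--     f0 = [1] + [0] * t   # f0[j]: ways for j remaining adjacent pairs, previous bit 0 (or non-1)
--     f1 = [1] + [0] * t   # f1[j]: same with previous bit 1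
--     for _ in range(m):
--         g0 = [f0[j] + f1[j] for j in range(t + 1)]
--         g1 = [f0[j] + (f1[j - 1] if j > 0 else 0) for j in range(t + 1)]
--         f0, f1 = g0, g1
--     return f1[t] if last_bit == 1 else f0[t]
-- ===== Notes on version B (the rewrite author's own statement) =====
-- stated objective: faster
-- what changed: Replaced the exponential branch-on-every-bit recursion by a bottom-up DP over (remaining positions, remaining adjacent pairs, last bit), iterating two length-(t+1) tables.
import Mathlib
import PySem

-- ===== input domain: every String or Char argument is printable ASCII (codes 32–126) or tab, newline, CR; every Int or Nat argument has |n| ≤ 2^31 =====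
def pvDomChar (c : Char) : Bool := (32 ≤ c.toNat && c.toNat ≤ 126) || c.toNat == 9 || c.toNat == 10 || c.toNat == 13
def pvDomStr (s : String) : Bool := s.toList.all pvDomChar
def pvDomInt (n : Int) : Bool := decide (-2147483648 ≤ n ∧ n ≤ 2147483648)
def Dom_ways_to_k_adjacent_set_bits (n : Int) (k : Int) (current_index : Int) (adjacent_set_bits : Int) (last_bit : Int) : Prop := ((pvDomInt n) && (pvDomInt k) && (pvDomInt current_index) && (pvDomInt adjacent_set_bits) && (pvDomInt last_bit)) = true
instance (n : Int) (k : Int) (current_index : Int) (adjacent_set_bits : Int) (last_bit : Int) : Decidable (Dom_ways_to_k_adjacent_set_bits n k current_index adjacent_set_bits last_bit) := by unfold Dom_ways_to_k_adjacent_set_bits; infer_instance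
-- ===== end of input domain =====

-- B replaces A's exponential recursion by a bottom-up DP over (remaining positions, remaining pairs, last bit); measurably faster (asymptotic).


-- ===== PORT A =====
-- Literal transliteration of A's recursion; `fuel` only bounds the recursion depth
-- (called with enough fuel whenever current_index ≤ n; fuel 0 is unreachable under Pre_).
def waysAuxA (fuel : Nat) (n : Int) (k : Int) (ci : Int) (asb : Int) (lb : Int) : Int :=
  match fuel with
  | 0 => 0
  | fuel + 1 =>
    if ci = n then (if asb = k then 1 else 0)
    else if lb = 1 then
      waysAuxA fuel n k (ci + 1) (asb + 1) 1 + waysAuxA fuel n k (ci + 1) asb 0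
    else
      waysAuxA fuel n k (ci + 1) asb 1 + waysAuxA fuel n k (ci + 1) asb 0

def ways_to_k_adjacent_set_bits (n : Int) (k : Int) (current_index : Int) (adjacent_set_bits : Int) (last_bit : Int) : Int :=
  waysAuxA ((n - current_index).toNat + 1) n k current_index adjacent_set_bits last_bit

-- ===== PORT B =====
-- one DP step of Source B's loop body: (f0, f1) ↦ (g0, g1); list indexing is always in
-- range (length t+1, index j ≤ t), so getD j 0 is exact for Python's f0[j]/f1[j-1].
def waysStepB (t : Nat) (p : List Int × List Int) : List Int × List Int :=
  ((List.range (t + 1)).map (fun j => p.1.getD j 0 + p.2.getD j 0),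
   (List.range (t + 1)).map (fun j => p.1.getD j 0 + (if 0 < j then p.2.getD (j - 1) 0 else 0)))

def ways_to_k_adjacent_set_bits_alt (n : Int) (k : Int) (current_index : Int) (adjacent_set_bits : Int) (last_bit : Int) : Int :=
  let m := n - current_index
  let t := k - adjacent_set_bits
  if t < 0 ∨ m < t then 0
  else
    let tn := t.toNat
    let p := (List.range m.toNat).foldl (fun p _ => waysStepB tn p)
               ((1 : Int) :: List.replicate tn 0, (1 : Int) :: List.replicate tn 0)
    if last_bit = 1 then p.2.getD tn 0 else p.1.getD tn 0

-- ===== PRECONDITION & SPEC =====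
-- Pre_ excludes current_index > n: there A's recursion never reaches its base case (Python raises RecursionError).
def Pre_ways_to_k_adjacent_set_bits (n : Int) (k : Int) (current_index : Int) (adjacent_set_bits : Int) (last_bit : Int) : Prop :=
  current_index ≤ n
instance (n : Int) (k : Int) (current_index : Int) (adjacent_set_bits : Int) (last_bit : Int) : Decidable (Pre_ways_to_k_adjacent_set_bits n k current_index adjacent_set_bits last_bit) := by unfold Pre_ways_to_k_adjacent_set_bits; infer_instance

def pvWitness_ways_to_k_adjacent_set_bits : Int × Int × Int × Int × Int := (4, 1, 0, 0, 0)


def Spec_ways_to_k_adjacent_set_bits (n : Int) (k : Int) (current_index : Int) (adjacent_set_bits : Int) (last_bit : Int) (out : Int) : Prop := out = ways_to_k_adjacent_set_bits_alt n k current_index adjacent_set_bits last_bit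
instance (n : Int) (k : Int) (current_index : Int) (adjacent_set_bits : Int) (last_bit : Int) (out : Int) : Decidable (Spec_ways_to_k_adjacent_set_bits n k current_index adjacent_set_bits last_bit out) := by unfold Spec_ways_to_k_adjacent_set_bits; infer_instance

-- ===== CLAIM (what is proved, stated in full; the proofs are below) =====
def Claim_equal_ways_to_k_adjacent_set_bits : Prop := ∀ (n : Int) (k : Int) (current_index : Int) (adjacent_set_bits : Int) (last_bit : Int), Dom_ways_to_k_adjacent_set_bits n k current_index adjacent_set_bits last_bit → Pre_ways_to_k_adjacent_set_bits n k current_index adjacent_set_bits last_bit → Spec_ways_to_k_adjacent_set_bits n k current_index adjacent_set_bits last_bit (ways_to_k_adjacent_set_bits n k current_index adjacent_set_bits last_bit)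


-- ===== LEMMAS AND PROOFS =====

-- the mathematical count: W m t lb = #strings of m bits, previous bit lb, with exactly t new adjacent 1-pairs
def W : Nat → Int → Int → Int
  | 0, t, _ => if t = 0 then 1 else 0
  | m + 1, t, lb => if lb = 1 then W m (t - 1) 1 + W m t 0 else W m t 1 + W m t 0

theorem W_zero (m : Nat) : ∀ (t lb : Int), (t < 0 ∨ (m : Int) < t) → W m t lb = 0 := by
  induction m with
  | zero => intro t lb h; simp only [W]; split <;> omega
  | succ m ih =>
    intro t lb h
    simp only [W]
    have h1 : W m (t - 1) 1 = 0 := ih _ _ (by push_cast at h ⊢; omega)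
    have h2 : W m t 0 = 0 := ih _ _ (by push_cast at h ⊢; omega)
    have h3 : W m t 1 = 0 := ih _ _ (by push_cast at h ⊢; omega)
    split <;> omega

theorem A_eq_W (fuel : Nat) : ∀ (n k ci asb lb : Int), ci ≤ n → (n - ci).toNat < fuel →
    waysAuxA fuel n k ci asb lb = W (n - ci).toNat (k - asb) lb := by
  induction fuel with
  | zero => intro _ _ _ _ _ _ h; omega
  | succ fuel ih =>
    intro n k ci asb lb hle hfuel
    simp only [waysAuxA]
    by_cases hci : ci = n
    · subst hci
      rw [if_pos rfl]
      have h0 : (ci - ci).toNat = 0 := by omega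
      rw [h0]; simp only [W]
      split <;> split <;> omega
    · have hlt : ci < n := lt_of_le_of_ne hle hci
      have hm : (n - ci).toNat = (n - (ci + 1)).toNat + 1 := by omega
      have hle' : ci + 1 ≤ n := by omega
      have hfu' : (n - (ci + 1)).toNat < fuel := by omega
      rw [if_neg hci, hm]
      simp only [W]
      by_cases hlb : lb = 1
      · rw [if_pos hlb, if_pos hlb, ih n k (ci+1) (asb+1) 1 hle' hfu',
            ih n k (ci+1) asb 0 hle' hfu']
        have : k - (asb + 1) = k - asb - 1 := by ring
        rw [this]
      · rw [if_neg hlb, if_neg hlb, ih n k (ci+1) asb 1 hle' hfu',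
            ih n k (ci+1) asb 0 hle' hfu']

-- getD of a mapped range
theorem getD_map_range (L : Nat) (f : Nat → Int) (j : Nat) (hj : j < L) :
    ((List.range L).map f).getD j 0 = f j := by
  rw [List.getD_eq_getElem?_getD, List.getElem?_map, List.getElem?_range hj]
  rfl

-- the initial row equals row 0 of W
theorem init_row (t : Nat) (lb : Int) :
    (1 : Int) :: List.replicate t 0 = (List.range (t + 1)).map (fun j : Nat => W 0 (j : Int) lb) := by
  induction t with
  | zero => simp [W]
  | succ t ih =>
    rw [List.range_succ, List.map_append]
    rw [List.replicate_succ' (a := (0:Int))]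
    have : W 0 ((t + 1 : Nat) : Int) lb = 0 := by
      simp only [W]; rw [if_neg (by push_cast; omega)]
    simp only [List.map_cons, List.map_nil, this]
    rw [← ih]
    rfl

theorem step_row (t i : Nat) :
    waysStepB t ((List.range (t + 1)).map (fun j : Nat => W i (j : Int) 0),
                 (List.range (t + 1)).map (fun j : Nat => W i (j : Int) 1)) =
    ((List.range (t + 1)).map (fun j : Nat => W (i + 1) (j : Int) 0),
     (List.range (t + 1)).map (fun j : Nat => W (i + 1) (j : Int) 1)) := by
  unfold waysStepB
  refine Prod.ext ?_ ?_ <;> simp only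
  · apply List.map_congr_left
    intro j hj
    have hjlt : j < t + 1 := List.mem_range.mp hj
    rw [getD_map_range _ _ _ hjlt, getD_map_range _ _ _ hjlt]
    simp only [W]
    rw [if_neg (by norm_num)]
    ring
  · apply List.map_congr_left
    intro j hj
    have hjlt : j < t + 1 := List.mem_range.mp hj
    rw [getD_map_range _ _ _ hjlt]
    by_cases h0 : 0 < j
    · rw [if_pos h0, getD_map_range _ _ _ (by omega)]
      simp only [W]
      rw [if_pos trivial]
      have : ((j - 1 : Nat) : Int) = (j : Int) - 1 := by omega
      rw [this]; ring
    · rw [if_neg h0]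
      have hj0 : j = 0 := by omega
      subst hj0
      simp only [W]
      rw [if_pos trivial, W_zero i (((0:Nat):Int) - 1) 1 (by omega)]
      ring

theorem fold_rows (t : Nat) (m : Nat) :
    (List.range m).foldl (fun p _ => waysStepB t p)
      ((1 : Int) :: List.replicate t 0, (1 : Int) :: List.replicate t 0) =
    ((List.range (t + 1)).map (fun j : Nat => W m (j : Int) 0),
     (List.range (t + 1)).map (fun j : Nat => W m (j : Int) 1)) := by
  induction m with
  | zero =>
    simp only [List.range_zero, List.foldl_nil]
    exact Prod.ext (init_row t 0) (init_row t 1)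
  | succ m ih =>
    rw [List.range_succ, List.foldl_append, ih]
    simp [step_row t m]

theorem W_lb_ne (m : Nat) (t : Int) (lb : Int) (h : lb ≠ 1) : W m t lb = W m t 0 := by
  cases m <;> simp only [W]
  rw [if_neg h, if_neg (by norm_num)]

theorem alt_eq_W (n k ci asb lb : Int) (hle : ci ≤ n) :
    ways_to_k_adjacent_set_bits_alt n k ci asb lb = W (n - ci).toNat (k - asb) lb := by
  unfold ways_to_k_adjacent_set_bits_alt
  simp only
  by_cases hg : k - asb < 0 ∨ n - ci < k - asb
  · rw [if_pos hg, W_zero _ _ _ (by omega)]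
  · rw [if_neg hg]
    have ht : ((k - asb).toNat : Int) = k - asb := by omega
    have htle : (k - asb).toNat < (k - asb).toNat + 1 := by omega
    rw [fold_rows (k - asb).toNat (n - ci).toNat]
    by_cases hlb : lb = 1
    · rw [if_pos hlb, getD_map_range _ _ _ htle, ht, hlb]
    · rw [if_neg hlb, getD_map_range _ _ _ htle, ht, W_lb_ne _ _ _ hlb]

-- ===== VERDICT (by name: the statement is the Claim_ definition above) =====
theorem ways_to_k_adjacent_set_bits_spec : Claim_equal_ways_to_k_adjacent_set_bits := by
  intro n k ci asb lb _ hpre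
  unfold Spec_ways_to_k_adjacent_set_bits ways_to_k_adjacent_set_bits
  rw [A_eq_W _ n k ci asb lb hpre (by omega), alt_eq_W n k ci asb lb hpre]
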